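-- pv_equiv track=rewrite | github.com/Isamel/vertex-ai-toolkit | src/vaig/utils/json_cleaner.py | _extract_json_by_stack
-- ===== SOURCE A (Python) =====
-- def _extract_json_by_stack(text: str) -> str:
--     """Find the outermost complete JSON object boundary using a brace stack.
--
--     Scans *text* (which must start at the first ``{``) character-by-character
--     to track nested braces, skipping over string literals.  Returns the
--     substring from the start up to (and including) the brace that closes the
--     outermost object.
--
--     If no complete object is found (truncated input), the full *text* is
--     returned so :func:`_repair_truncated_json` can close it.
--
--     Args:
--         text: Input string starting at the first ``{``.
--
--     Returns:
--         The shortest prefix of *text* that forms a complete JSON object, or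
--         *text* unchanged if the object is incomplete.
--     """
--     depth = 0
--     in_string = False
--     escape_next = False
--
--     for i, char in enumerate(text):
--         if escape_next:
--             escape_next = False
--             continue
--         if char == "\\" and in_string:
--             escape_next = True
--             continue
--         if char == '"':
--             in_string = not in_string
--             continue
--         if in_string:
--             continue
--         if char == "{":
--             depth += 1
--         elif char == "}":
--             depth -= 1
--             if depth == 0:
--                 return text[: i + 1]
--
--     # Outermost object never closed — return full text for repair
--     return text
-- ===== SOURCE B (Python) =====
-- def _extract_json_by_stack(text: str) -> str:
--     """Index-driven rewrite: outer while tracks only brace depth; an inner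
--     while consumes each string literal (skipping the char after a backslash)."""
--     depth = 0
--     i = 0
--     n = len(text)
--     while i < n:
--         c = text[i]
--         if c == '"':
--             i += 1
--             while i < n:
--                 if text[i] == "\\":
--                     i += 2
--                 elif text[i] == '"':
--                     i += 1
--                     break
--                 else:
--                     i += 1
--             continue
--         if c == "{":
--             depth += 1
--         elif c == "}":
--             depth -= 1
--             if depth == 0:
--                 return text[: i + 1]
--         i += 1
--     return text
-- ===== Notes on version B (the rewrite author's own statement) =====
-- stated objective: alternative
-- what changed: Replaces A's flat four-variable state machine (depth/in_string/escape_next flags checked on every character) with an index-driven outer loop that tracks only brace depth and a nested inner loop that consumes each string literal, skipping the character after a backslash.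
import Mathlib
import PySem

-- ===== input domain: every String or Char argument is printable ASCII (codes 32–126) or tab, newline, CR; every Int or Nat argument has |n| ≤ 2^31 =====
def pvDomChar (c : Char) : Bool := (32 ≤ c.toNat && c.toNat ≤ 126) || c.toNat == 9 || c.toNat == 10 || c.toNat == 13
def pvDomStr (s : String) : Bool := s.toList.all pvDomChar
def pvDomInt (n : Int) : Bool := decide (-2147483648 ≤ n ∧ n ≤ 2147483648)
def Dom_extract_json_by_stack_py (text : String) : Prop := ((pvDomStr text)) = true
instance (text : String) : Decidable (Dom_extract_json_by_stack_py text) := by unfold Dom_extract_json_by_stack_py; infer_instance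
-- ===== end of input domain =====

-- B rewrites A's flat four-state scanner as an index-driven loop tracking only depth,
-- with a nested loop that consumes each string literal (objective: alternative decomposition).

-- ===== PORT A =====
-- A's for-loop over enumerate(text) with state (depth, in_string, escape_next);
-- returns the cut length i+1 on the depth-0 close, none when the loop finishes.
def pvAGo : List Char → Nat → Int → Bool → Bool → Option Nat
  | [], _, _, _, _ => none
  | c :: rest, i, depth, inString, escapeNext =>
    if escapeNext then pvAGo rest (i+1) depth inString false
    else if c = '\\' ∧ inString then pvAGo rest (i+1) depth inString true
    else if c = '"' then pvAGo rest (i+1) depth (!inString) escapeNext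
    else if inString then pvAGo rest (i+1) depth inString escapeNext
    else if c = '{' then pvAGo rest (i+1) (depth+1) inString escapeNext
    else if c = '}' then
      (if depth - 1 = 0 then some (i+1) else pvAGo rest (i+1) (depth-1) inString escapeNext)
    else pvAGo rest (i+1) depth inString escapeNext

def extract_json_by_stack_py (text : String) : String :=
  match pvAGo text.toList 0 0 false false with
  | some k => String.ofList (text.toList.take k)   -- text[:i+1], 0 ≤ i+1 so slicing = take
  | none => text

-- ===== PORT B =====
-- inner while loop: consume a string literal; returns (rest of chars, new index i)
def pvBStr : List Char → Nat → List Char × Nat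
  | [], i => ([], i)
  | c :: rest, i =>
    if c = '\\' then pvBStr (rest.drop 1) (i+2)
    else if c = '"' then (rest, i+1)
    else pvBStr rest (i+1)
termination_by l _ => l.length
decreasing_by
  all_goals (simp; try omega)

theorem pvBStr_len_le_aux : ∀ (n : Nat) (l : List Char), l.length ≤ n → ∀ (i : Nat), (pvBStr l i).1.length ≤ l.length := by
  intro n
  induction n with
  | zero =>
      intro l hl i
      have h : l = [] := by cases l <;> simp_all
      subst h; simp [pvBStr]
  | succ n ih =>
      intro l hl i
      cases l with
      | nil => simp [pvBStr]
      | cons c rest =>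
        by_cases hbs : c = '\\'
        · subst hbs
          simp only [pvBStr]
          have h1 : (rest.drop 1).length ≤ n := by simp at hl ⊢; omega
          calc (pvBStr (rest.drop 1) (i+2)).1.length ≤ (rest.drop 1).length := ih _ h1 _
            _ ≤ ('\\' :: rest).length := by simp; omega
        · by_cases hq : c = '"'
          · subst hq; simp [pvBStr]
          · simp only [pvBStr, if_neg hbs, if_neg hq]
            have h1 : rest.length ≤ n := by simp at hl; omega
            exact le_trans (ih rest h1 (i+1)) (by simp)

theorem pvBStr_len_le (l : List Char) (i : Nat) : (pvBStr l i).1.length ≤ l.length :=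
  pvBStr_len_le_aux l.length l le_rfl i

-- outer while loop: only brace depth is tracked
def pvBGo : List Char → Nat → Int → Option Nat
  | [], _, _ => none
  | c :: rest, i, depth =>
    if c = '"' then pvBGo (pvBStr rest (i+1)).1 (pvBStr rest (i+1)).2 depth
    else if c = '{' then pvBGo rest (i+1) (depth+1)
    else if c = '}' then
      (if depth - 1 = 0 then some (i+1) else pvBGo rest (i+1) (depth-1))
    else pvBGo rest (i+1) depth
termination_by l _ _ => l.length
decreasing_by
  · have := pvBStr_len_le rest (i+1); simp; omega
  · simp
  · simp
  · simp

def extract_json_by_stack_py_alt (text : String) : String :=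
  match pvBGo text.toList 0 0 with
  | some k => String.ofList (text.toList.take k)   -- text[:i+1]
  | none => text

-- ===== PRECONDITION & SPEC =====
def Spec_extract_json_by_stack_py (text : String) (out : String) : Prop := out = extract_json_by_stack_py_alt text
instance (text : String) (out : String) : Decidable (Spec_extract_json_by_stack_py text out) := by unfold Spec_extract_json_by_stack_py; infer_instance

-- ===== CLAIM (what is proved, stated in full; the proofs are below) =====
def Claim_equal_extract_json_by_stack_py : Prop := ∀ (text : String), Dom_extract_json_by_stack_py text → Spec_extract_json_by_stack_py text (extract_json_by_stack_py text)

-- ===== LEMMAS AND PROOFS =====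

-- The key invariant: outside a string A's scanner is B's outer loop; inside a
-- string (no pending escape) A's scanner is B's outer loop run after pvBStr.
theorem pvKey : ∀ (n : Nat) (l : List Char), l.length ≤ n → ∀ (i : Nat) (d : Int),
    pvAGo l i d false false = pvBGo l i d ∧
    pvAGo l i d true false = pvBGo (pvBStr l i).1 (pvBStr l i).2 d := by
  intro n
  induction n with
  | zero =>
      intro l hl i d
      have : l = [] := List.eq_nil_of_length_eq_zero (Nat.le_zero.mp hl)
      subst this
      simp [pvAGo, pvBGo, pvBStr]
  | succ n ih =>
      intro l hl i d
      cases l with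
      | nil => simp [pvAGo, pvBGo, pvBStr]
      | cons c rest =>
        have hrest : rest.length ≤ n := by simpa using Nat.succ_le_succ_iff.mp hl
        constructor
        · -- not in string
          by_cases hq : c = '"'
          · subst hq
            simp only [pvAGo, pvBGo]
            norm_num
            exact (ih rest hrest (i+1) d).2
          · by_cases hob : c = '{'
            · subst hob
              simp only [pvAGo, pvBGo]
              norm_num
              exact (ih rest hrest (i+1) (d+1)).1
            · by_cases hcb : c = '}'
              · subst hcb
                simp only [pvAGo, pvBGo]
                norm_num
                split_ifs with h
                · rfl
                · exact (ih rest hrest (i+1) (d-1)).1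
              · simp only [pvAGo, pvBGo, hq, hob, hcb]
                norm_num [hq, hob, hcb]
                exact (ih rest hrest (i+1) d).1
        · -- in string, no pending escape
          by_cases hbs : c = '\\'
          · subst hbs
            simp only [pvAGo, pvBStr]
            norm_num
            cases rest with
            | nil => simp [pvAGo, pvBStr, pvBGo]
            | cons c2 r2 =>
              have hr2 : r2.length ≤ n := by simp at hl; omega
              simp only [pvAGo, if_true, List.tail_cons]
              exact (ih r2 hr2 (i+2) d).2
          · by_cases hq : c = '"'
            · subst hq
              simp only [pvAGo, pvBStr]
              norm_num
              exact (ih rest hrest (i+1) d).1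
            · simp only [pvAGo, pvBStr, hbs, hq]
              norm_num [hbs, hq]
              exact (ih rest hrest (i+1) d).2

-- ===== VERDICT (by name: the statement is the Claim_ definition above) =====
theorem extract_json_by_stack_py_spec : Claim_equal_extract_json_by_stack_py := by
  intro text _
  unfold Spec_extract_json_by_stack_py extract_json_by_stack_py extract_json_by_stack_py_alt
  rw [(pvKey text.toList.length text.toList le_rfl 0 0).1]
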